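-- pv_equiv track=rewrite | github.com/MrBrantCode/unitest_baseline | mut_generate/mist_train_cf/cf_35703/solution.py | parseHTMLStructure
-- ===== SOURCE A (Python) =====
-- def parseHTMLStructure(code: str) -> str:
--     stack = []
--     result = ""
--     i = 0
--     while i < len(code):
--         if code[i] == "<":
--             j = i
--             while code[j] != ">":
--                 j += 1
--             tag = code[i+1:j]
--             if tag[0] != "/":
--                 if stack:
--                     result += "    " * len(stack) + tag + "\n"
--                 else:
--                     result += tag + "\n"
--                 stack.append(tag)
--             else:
--                 stack.pop()
--             i = j
--         i += 1
--     return result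
-- ===== SOURCE B (Python) =====
-- def parseHTMLStructure(code: str) -> str:
--     # Pass 1: tokenize all tags (same '<'...'>' scan as the original).
--     tags = []
--     i = 0
--     n = len(code)
--     while i < n:
--         if code[i] == '<':
--             j = i + 1
--             while code[j] != '>':
--                 j += 1
--             tags.append(code[i + 1:j])
--             i = j
--         i += 1
--     # Pass 2: render with a depth counter instead of a stack.
--     lines = []
--     depth = 0
--     for tag in tags:
--         if not tag.startswith('/'):
--             lines.append('    ' * depth + tag + '\n')
--             depth += 1
--         else:
--             depth -= 1
--     return ''.join(lines)
-- ===== Notes on version B (the rewrite author's own statement) =====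
-- stated objective: alternative
-- what changed: A's single emit-as-you-go scan that grows a result string and a stack of tag strings is replaced by two passes: first tokenize all tags, then render them with an integer depth counter instead of a stack, collecting lines in a list joined once at the end.
import Mathlib
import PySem

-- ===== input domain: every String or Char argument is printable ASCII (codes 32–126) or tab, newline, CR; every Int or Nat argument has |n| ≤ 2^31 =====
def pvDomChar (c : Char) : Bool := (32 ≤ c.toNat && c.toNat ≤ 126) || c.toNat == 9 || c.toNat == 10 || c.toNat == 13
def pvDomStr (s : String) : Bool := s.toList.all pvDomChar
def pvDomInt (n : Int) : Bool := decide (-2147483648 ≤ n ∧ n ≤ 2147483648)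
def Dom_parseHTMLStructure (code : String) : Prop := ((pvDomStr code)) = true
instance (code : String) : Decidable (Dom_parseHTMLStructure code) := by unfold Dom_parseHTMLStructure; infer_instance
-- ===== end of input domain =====

-- B replaces A's single emit-as-you-go scan with a stack of tag strings by two passes
-- (tokenize all tags, then render with an integer depth counter): objective 'alternative'.
-- Both ports work over List Char (result accumulated as a char list, wrapped into a String
-- once at the end) because Lean's own String operations are opaque to the kernel.
-- Pre_ excludes exactly the inputs where the Python A raises IndexError (unterminated '<',
-- empty tag '<>', or a closing tag popping an empty stack); A returns on all other inputs.

-- ===== PORT A =====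
-- one step per character; at '<' the inner `while code[j] != '>'` loop is the
-- takeWhile/dropWhile split of the remaining characters at the first '>'
def pvLoopA (cs : List Char) (stack : List (List Char)) (result : List Char) : List Char :=
  match cs with
  | [] => result
  | c :: rest =>
    if c = '<' then
      if (rest.dropWhile (fun x => x ≠ '>')).isEmpty then
        result            -- unterminated '<': Python raises IndexError (excluded by Pre_)
      else
        match rest.takeWhile (fun x => x ≠ '>') with
        | [] => result    -- empty tag '<>': Python raises IndexError on tag[0] (excluded)
        | t0 :: ttl =>
          if t0 ≠ '/' then
            pvLoopA ((rest.dropWhile (fun x => x ≠ '>')).tail) (stack ++ [t0 :: ttl])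
              (if stack ≠ [] then
                 result ++ List.replicate (4 * stack.length) ' ' ++ (t0 :: ttl) ++ ['\n']
               else result ++ (t0 :: ttl) ++ ['\n'])
          else
            match stack with
            | [] => result  -- stack.pop() on empty: Python raises IndexError (excluded)
            | _ :: _ => pvLoopA ((rest.dropWhile (fun x => x ≠ '>')).tail) stack.dropLast result
    else pvLoopA rest stack result
termination_by cs.length
decreasing_by
  all_goals
    simp only [List.length_tail, List.length_cons]
  · have := List.length_dropWhile_le (p := fun x : Char => x ≠ '>') (l := rest); omega
  · have := List.length_dropWhile_le (p := fun x : Char => x ≠ '>') (l := rest); omega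
  · omega

def parseHTMLStructure (code : String) : String :=
  String.ofList (pvLoopA code.toList [] [])

-- ===== PORT B =====
-- pass 1: collect the tag bodies, same '<' … '>' scan
def pvTokens (cs : List Char) : List (List Char) :=
  match cs with
  | [] => []
  | c :: rest =>
    if c = '<' then
      if (rest.dropWhile (fun x => x ≠ '>')).isEmpty then
        []                -- unterminated '<': Python raises IndexError (excluded by Pre_)
      else
        rest.takeWhile (fun x => x ≠ '>') :: pvTokens ((rest.dropWhile (fun x => x ≠ '>')).tail)
    else pvTokens rest
termination_by cs.length
decreasing_by
  all_goals simp only [List.length_tail, List.length_cons]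
  · have := List.length_dropWhile_le (p := fun x : Char => x ≠ '>') (l := rest); omega
  · omega

-- pass 2: depth counter replaces the stack
def pvRender (ts : List (List Char)) (depth : Nat) : List (List Char) :=
  match ts with
  | [] => []
  | t :: ts' =>
    if ¬ (PySem.Chars.startswith t ['/']) then
      (List.replicate (4 * depth) ' ' ++ t ++ ['\n']) :: pvRender ts' (depth + 1)
    else pvRender ts' (depth - 1)

def parseHTMLStructure_alt (code : String) : String :=
  String.ofList (pvRender (pvTokens code.toList) 0).flatten

-- ===== PRECONDITION & SPEC =====
-- Closed-form well-formedness of the input, checked on the '>'-separated segments of the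
-- string: (1) no '<' after the last '>' (so every '<' is terminated); each segment before a
-- '>' that contains a '<' contributes one tag, the part after its first '<'; (2) no tag is
-- empty; (3) in every prefix of the tag sequence the closing tags ('/'-initial) never
-- outnumber the opening ones. These are exactly the inputs on which the Python A returns
-- normally; on all other inputs A raises IndexError.
def pvTagOf (s : List Char) : List Char := (s.dropWhile (fun x => x ≠ '<')).tail

def pvTags (cs : List Char) : List (List Char) :=
  ((cs.splitOn '>').dropLast.filter (fun s => '<' ∈ s)).map pvTagOf

def pvIsClose (t : List Char) : Bool := t.head? == some '/'

def Pre_parseHTMLStructure (code : String) : Prop :=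
  '<' ∉ ((code.toList.splitOn '>').getLastD [])
  ∧ [] ∉ pvTags code.toList
  ∧ ∀ n ≤ (pvTags code.toList).length,
      ((pvTags code.toList).take n).countP pvIsClose
        ≤ ((pvTags code.toList).take n).countP (fun t => !pvIsClose t)
instance (code : String) : Decidable (Pre_parseHTMLStructure code) := by
  unfold Pre_parseHTMLStructure; infer_instance

def pvWitness_parseHTMLStructure : String := "<a>x<b></b></a><c></c>"

def Spec_parseHTMLStructure (code : String) (out : String) : Prop := out = parseHTMLStructure_alt code
instance (code : String) (out : String) : Decidable (Spec_parseHTMLStructure code out) := by unfold Spec_parseHTMLStructure; infer_instance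

-- ===== CLAIM (what is proved, stated in full; the proofs are below) =====
def Claim_equal_parseHTMLStructure : Prop := ∀ (code : String), Dom_parseHTMLStructure code → Pre_parseHTMLStructure code → Spec_parseHTMLStructure code (parseHTMLStructure code)

-- ===== LEMMAS AND PROOFS =====

-- proof-side scan predicate: the recursive form of Pre_ that follows A's traversal
def pvOk (cs : List Char) (depth : Nat) : Bool :=
  match cs with
  | [] => true
  | c :: rest =>
    if c = '<' then
      if (rest.dropWhile (fun x => x ≠ '>')).isEmpty then false
      else
        match rest.takeWhile (fun x => x ≠ '>') with
        | [] => false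
        | t0 :: _ =>
          if t0 ≠ '/' then pvOk ((rest.dropWhile (fun x => x ≠ '>')).tail) (depth + 1)
          else decide (0 < depth) && pvOk ((rest.dropWhile (fun x => x ≠ '>')).tail) (depth - 1)
    else pvOk rest depth
termination_by cs.length
decreasing_by
  all_goals simp only [List.length_tail, List.length_cons]
  · have := List.length_dropWhile_le (p := fun x : Char => x ≠ '>') (l := rest); omega
  · have := List.length_dropWhile_le (p := fun x : Char => x ≠ '>') (l := rest); omega
  · omega

-- the balance condition of Pre_, generalized to a starting depth
def pvBal (ts : List (List Char)) (d : Nat) : Prop :=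
  ∀ n ≤ ts.length, (ts.take n).countP pvIsClose ≤ (ts.take n).countP (fun t => !pvIsClose t) + d

lemma pvGetLastD_of_ne_nil {α : Type} (l : List α) (a b : α) (h : l ≠ []) :
    l.getLastD a = l.getLastD b := by
  cases l with
  | nil => exact absurd rfl h
  | cons x xs => rw [List.getLastD_cons, List.getLastD_cons]

lemma pvSplitOnP_no_sep {α : Type} (p : α → Bool) (a : List α)
    (ha : ∀ x ∈ a, p x = false) : a.splitOnP p = [a] := by
  induction a with
  | nil => rfl
  | cons x xs ih =>
    rw [List.splitOnP_cons, ha x (by simp), if_neg (by simp),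
      ih (fun y hy => ha y (by simp [hy]))]
    rfl

lemma pvSplitOnP_sep {α : Type} (p : α → Bool) (a b : List α) (s : α)
    (ha : ∀ x ∈ a, p x = false) (hs : p s = true) :
    (a ++ s :: b).splitOnP p = a :: b.splitOnP p := by
  induction a with
  | nil => simp [List.splitOnP_cons, hs]
  | cons x xs ih =>
    rw [List.cons_append, List.splitOnP_cons, ha x (by simp), if_neg (by simp),
      ih (fun y hy => ha y (by simp [hy]))]
    rfl

lemma pvBal_nil (d : Nat) : pvBal [] d := by
  intro n hn
  simp at hn
  simp [hn]

lemma pvBal_cons_open (t : List Char) (ts : List (List Char)) (d : Nat)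
    (h : pvIsClose t = false) : pvBal (t :: ts) d ↔ pvBal ts (d + 1) := by
  constructor
  · intro hb n hn
    have h2 := hb (n + 1) (by simpa using hn)
    simp [List.take_succ_cons, h] at h2
    omega
  · intro hb n hn
    cases n with
    | zero => simp [List.take_zero]
    | succ m =>
      have := hb m (by simpa using hn)
      simp [List.take_succ_cons, h]
      omega

lemma pvBal_cons_close (t : List Char) (ts : List (List Char)) (d : Nat)
    (h : pvIsClose t = true) : pvBal (t :: ts) d ↔ (0 < d ∧ pvBal ts (d - 1)) := by
  constructor
  · intro hb
    have h1 := hb 1 (by simp)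
    simp [h] at h1
    refine ⟨by omega, ?_⟩
    intro n hn
    have := hb (n + 1) (by simpa using hn)
    simp [List.take_succ_cons, h] at this
    omega
  · rintro ⟨hd, hb⟩ n hn
    cases n with
    | zero => simp [List.take_zero]
    | succ m =>
      have := hb m (by simpa using hn)
      simp [List.take_succ_cons, h]
      omega

-- splitOn/tags unfolding at a '<' whose tag is terminated
lemma pvSplit_lt (rest : List Char) (hdrop : ¬(rest.dropWhile (fun x => x ≠ '>')).isEmpty = true) :
    ('<' :: rest).splitOn '>' =
      ('<' :: rest.takeWhile (fun x => x ≠ '>')) ::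
        ((rest.dropWhile (fun x => x ≠ '>')).tail).splitOn '>'
    ∧ pvTags ('<' :: rest) =
        rest.takeWhile (fun x => x ≠ '>') :: pvTags ((rest.dropWhile (fun x => x ≠ '>')).tail) := by
  have hne : rest.dropWhile (fun x => x ≠ '>') ≠ [] := by
    intro hx; rw [hx] at hdrop; simp at hdrop
  obtain ⟨d0, rest2, hdw⟩ := List.exists_cons_of_ne_nil hne
  have hd0 : d0 = '>' := by
    have h1 := List.head_dropWhile_not (fun x => decide (x ≠ '>')) hne
    simp only [hdw] at h1
    simpa using h1
  subst hd0
  have hrest : rest = rest.takeWhile (fun x => x ≠ '>') ++ '>' :: rest2 := by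
    conv_lhs => rw [← List.takeWhile_append_dropWhile (p := fun x => decide (x ≠ '>')) (l := rest)]
    rw [hdw]
  have hmem : ∀ x ∈ '<' :: rest.takeWhile (fun x => x ≠ '>'), (x == '>') = false := by
    intro x hx
    rcases List.mem_cons.mp hx with h | h
    · simp [h]
    · have := List.mem_takeWhile_imp h
      simpa using this
  have hs : ('<' :: rest).splitOn '>' =
      ('<' :: rest.takeWhile (fun x => x ≠ '>')) :: rest2.splitOn '>' := by
    conv_lhs => rw [hrest]
    exact pvSplitOnP_sep (· == '>') ('<' :: rest.takeWhile (fun x => x ≠ '>')) rest2 '>'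
      hmem (by simp)
  have hne2 : rest2.splitOn '>' ≠ [] := List.splitOnP_ne_nil _ _
  have htg : pvTagOf ('<' :: rest.takeWhile (fun x => x ≠ '>')) =
      rest.takeWhile (fun x => x ≠ '>') := by
    simp [pvTagOf]
  refine ⟨by rw [hs, hdw]; rfl, ?_⟩
  rw [pvTags, hs, List.dropLast_cons_of_ne_nil hne2, hdw, List.tail_cons]
  simp only [List.filter_cons]
  rw [if_pos (by simp), List.map_cons, htg]
  rfl

lemma pvLast_cons_gt (rest : List Char) :
    (('>' :: rest).splitOn '>').getLastD [] = (rest.splitOn '>').getLastD [] := by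
  have hs : ('>' :: rest).splitOn '>' = [] :: rest.splitOn '>' := by
    show List.splitOnP _ _ = _
    rw [List.splitOnP_cons, if_pos (by simp)]
    rfl
  rw [hs, List.getLastD_cons]

lemma pvTags_cons_gt (rest : List Char) : pvTags ('>' :: rest) = pvTags rest := by
  have hs : ('>' :: rest).splitOn '>' = [] :: rest.splitOn '>' := by
    show List.splitOnP _ _ = _
    rw [List.splitOnP_cons, if_pos (by simp)]
    rfl
  have hne3 : rest.splitOn '>' ≠ [] := List.splitOnP_ne_nil _ _
  rw [pvTags, hs, List.dropLast_cons_of_ne_nil hne3]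
  simp only [List.filter_cons]
  rw [if_neg (by simp)]
  rfl

lemma pvSplit_other (c : Char) (rest : List Char) (hgt : c ≠ '>') :
    (c :: rest).splitOn '>' = ((rest.splitOn '>').headD []).cons c :: (rest.splitOn '>').tail := by
  show List.splitOnP _ _ = _
  rw [List.splitOnP_cons, if_neg (by simp [hgt])]
  obtain ⟨s, ss, hss⟩ := List.exists_cons_of_ne_nil (List.splitOnP_ne_nil (· == '>') rest)
  rw [show rest.splitOn '>' = List.splitOnP (· == '>') rest from rfl, hss]
  rfl

lemma pvLast_cons_other (c : Char) (rest : List Char) (hc : c ≠ '<') (hgt : c ≠ '>') :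
    ('<' ∈ ((c :: rest).splitOn '>').getLastD []) ↔ ('<' ∈ ((rest.splitOn '>').getLastD [])) := by
  obtain ⟨s, ss, hss⟩ := List.exists_cons_of_ne_nil (List.splitOnP_ne_nil (· == '>') rest)
  have hss' : rest.splitOn '>' = s :: ss := hss
  rw [pvSplit_other c rest hgt, hss']
  cases ss with
  | nil => simp [Ne.symm hc]
  | cons s1 ss' => simp

lemma pvTags_cons_other (c : Char) (rest : List Char) (hc : c ≠ '<') (hgt : c ≠ '>') :
    pvTags (c :: rest) = pvTags rest := by
  obtain ⟨s, ss, hss⟩ := List.exists_cons_of_ne_nil (List.splitOnP_ne_nil (· == '>') rest)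
  have hss' : rest.splitOn '>' = s :: ss := hss
  rw [pvTags, pvTags, pvSplit_other c rest hgt, hss']
  cases ss with
  | nil => simp
  | cons s1 ss' =>
    rw [List.dropLast_cons_of_ne_nil (by simp), List.dropLast_cons_of_ne_nil (by simp)]
    by_cases hmem : '<' ∈ s <;>
      simp [hmem, hc, Ne.symm hc, pvTagOf]

lemma pvOk_iff (cs : List Char) (d : Nat) :
    pvOk cs d = true ↔
      ('<' ∉ ((cs.splitOn '>').getLastD []) ∧ [] ∉ pvTags cs ∧ pvBal (pvTags cs) d) := by
  fun_induction pvOk cs d with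
  | case1 => simp [List.splitOn, pvTags, pvBal_nil]
  | case2 =>
    rename_i d rest hdrop
    have hs : ('<' :: rest).splitOn '>' = ['<' :: rest] := by
      refine pvSplitOnP_no_sep _ _ ?_
      intro x hx
      rcases List.mem_cons.mp hx with h | h
      · simp [h]
      · have := List.dropWhile_eq_nil_iff.mp (List.isEmpty_iff.mp hdrop) x h
        simpa using this
    simp [hs]
  | case3 =>
    rename_i d rest hdrop htake
    obtain ⟨hs, htags⟩ := pvSplit_lt rest hdrop
    rw [htake] at htags
    simp [htags]
  | case4 =>
    rename_i d rest hdrop t0 ttl htake hslash ih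
    obtain ⟨hs, htags⟩ := pvSplit_lt rest hdrop
    rw [htake] at htags hs
    rw [hs, htags, ih,
      pvBal_cons_open _ _ _ (by simp [pvIsClose, hslash]), List.getLastD_cons,
      pvGetLastD_of_ne_nil (((rest.dropWhile (fun x => x ≠ '>')).tail).splitOn '>')
        ('<' :: t0 :: ttl) [] (by exact List.splitOnP_ne_nil _ _)]
    simp
  | case5 =>
    rename_i d rest hdrop t0 ttl htake hslash ih
    have ht0 : t0 = '/' := by by_contra hx; exact hslash hx
    obtain ⟨hs, htags⟩ := pvSplit_lt rest hdrop
    rw [htake] at htags hs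
    simp only [Bool.and_eq_true, decide_eq_true_eq]
    rw [hs, htags, ih,
      pvBal_cons_close _ _ _ (by simp [pvIsClose, ht0]), List.getLastD_cons,
      pvGetLastD_of_ne_nil (((rest.dropWhile (fun x => x ≠ '>')).tail).splitOn '>')
        ('<' :: t0 :: ttl) [] (by exact List.splitOnP_ne_nil _ _)]
    simp
    tauto
  | case6 =>
    rename_i d c rest hc ih
    by_cases hgt : c = '>'
    · subst hgt
      rw [ih, pvTags_cons_gt, pvLast_cons_gt]
    · rw [ih, pvTags_cons_other c rest hc hgt, pvLast_cons_other c rest hc hgt]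

lemma pvStartswith_cons (t0 : Char) (ttl : List Char) :
    PySem.Chars.startswith (t0 :: ttl) ['/'] = (t0 == '/') := by
  simp [PySem.Chars.startswith, List.isPrefixOf, BEq.comm]

-- loop invariant: with a well-formed remainder, A's loop appends exactly what B's
-- render pass produces from the remaining tokens at depth = stack length
lemma pvLoop_eq (cs : List Char) (stack : List (List Char)) (result : List Char)
    (h : pvOk cs stack.length = true) :
    pvLoopA cs stack result = result ++ (pvRender (pvTokens cs) stack.length).flatten := by
  fun_induction pvLoopA cs stack result with
  | case1 => simp [pvTokens, pvRender]
  | case2 =>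
    rename_i hdrop
    rw [pvOk] at h
    simp at h
    simp at hdrop
    exact (hdrop _ h.1 rfl).elim
  | case3 =>
    rename_i hdrop htake
    rw [pvOk] at h
    rw [if_pos rfl, if_neg hdrop, htake] at h
    exact absurd h (by simp)
  | case4 =>
    rename_i hdrop t0 ttl htake hslash ih
    rename_i stack result rest
    rw [pvOk] at h
    rw [if_pos rfl, if_neg hdrop, htake] at h
    simp only [if_pos hslash] at h
    refine Eq.trans (ih (by simpa using h)) ?_
    rw [pvTokens]
    rw [if_pos rfl, if_neg hdrop, htake]
    rw [pvRender]
    have hb : (t0 == '/') = false := by simp [hslash]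
    simp only [pvStartswith_cons, hb, Bool.false_eq_true, not_false_iff, if_pos]
    by_cases hs : stack = [] <;> simp [hs, List.append_assoc]
  | case5 =>
    rename_i hdrop t0 ttl htake hslash
    have ht0 : t0 = '/' := by by_contra hx; exact hslash hx
    rw [pvOk] at h
    rw [if_pos rfl, if_neg hdrop, htake] at h
    simp [ht0] at h
  | case6 =>
    rename_i hdrop t0 ttl htake hslash hd tl ih
    have ht0 : t0 = '/' := by by_contra hx; exact hslash hx
    rw [pvOk] at h
    rw [if_pos rfl, if_neg hdrop, htake] at h
    simp [ht0] at h
    refine Eq.trans (ih (by simp [h])) ?_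
    rw [pvTokens]
    rw [if_pos rfl, if_neg hdrop, htake]
    rw [pvRender]
    simp [pvStartswith_cons, ht0]
  | case7 =>
    rename_i hc ih
    rw [pvOk] at h
    simp only [if_neg hc] at h
    rw [ih h, pvTokens]
    simp [hc]

-- ===== VERDICT (by name: the statement is the Claim_ definition above) =====
theorem parseHTMLStructure_spec : Claim_equal_parseHTMLStructure := by
  intro code _ hpre
  unfold Pre_parseHTMLStructure at hpre
  have hok : pvOk code.toList 0 = true :=
    (pvOk_iff code.toList 0).mpr
      ⟨hpre.1, hpre.2.1, fun n hn => by simpa using hpre.2.2 n hn⟩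
  unfold Spec_parseHTMLStructure parseHTMLStructure parseHTMLStructure_alt
  rw [pvLoop_eq code.toList [] [] (by simpa using hok)]
  simp
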